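-- pv_equiv track=rewrite | github.com/Binkmaster/cuneiform | primes/techniques/reciprocal_pairs.py | _generate_regular_numbers
-- ===== SOURCE A (Python) =====
-- def _generate_regular_numbers(limit: int) -> list[int]:
--     """Generate all 5-smooth (regular) numbers less than `limit`, sorted."""
--     results = []
--     a = 1
--     while a < limit:
--         b = a
--         while b < limit:
--             c = b
--             while c < limit:
--                 results.append(c)
--                 c *= 5
--             b *= 3
--         a *= 2
--     results.sort()
--     return results
-- ===== SOURCE B (Python) =====
-- def _merge(xs, ys):
--     """Merge two sorted lists into one sorted list."""
--     out = []
--     i = j = 0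
--     while i < len(xs) and j < len(ys):
--         if xs[i] < ys[j]:
--             out.append(xs[i])
--             i += 1
--         else:
--             out.append(ys[j])
--             j += 1
--     out.extend(xs[i:])
--     out.extend(ys[j:])
--     return out
--
--
-- def _generate_regular_numbers(limit: int) -> list[int]:
--     """Generate all 5-smooth (regular) numbers less than `limit`, sorted."""
--     def powers(p):
--         out, v = [], 1
--         while v < limit:
--             out.append(v)
--             v *= p
--         return out
--
--     twos = powers(2)
--     result = []
--     for t in powers(3):
--         for f in powers(5):
--             result = _merge(result, [t * f * u for u in twos if t * f * u < limit])
--     return result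
-- ===== Notes on version B (the rewrite author's own statement) =====
-- stated objective: alternative
-- what changed: Instead of emitting 5-smooth numbers from three nested in-place multiplying while-loops and sorting at the end, B precomputes the three power lists once and builds the result already sorted by repeatedly merging sorted geometric runs, so no final sort is needed.
import Mathlib
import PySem

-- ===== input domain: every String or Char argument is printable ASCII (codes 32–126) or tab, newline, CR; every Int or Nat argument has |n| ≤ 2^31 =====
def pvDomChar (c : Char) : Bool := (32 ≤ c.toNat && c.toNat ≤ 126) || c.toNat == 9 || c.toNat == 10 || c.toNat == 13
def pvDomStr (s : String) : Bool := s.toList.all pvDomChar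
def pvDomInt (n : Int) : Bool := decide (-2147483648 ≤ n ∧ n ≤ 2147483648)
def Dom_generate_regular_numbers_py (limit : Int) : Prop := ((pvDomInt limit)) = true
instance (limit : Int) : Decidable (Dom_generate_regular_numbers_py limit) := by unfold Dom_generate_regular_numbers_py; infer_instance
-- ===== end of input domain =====

-- B replaces A's generate-then-sort (three nested multiplying while-loops plus a final sort) by
-- merging sorted geometric runs built from precomputed power lists, so the result is produced already sorted.

-- ===== PORT A =====
-- innermost `while c < limit: results.append(c); c *= 5`  (the `0 < c` conjunct is a totality guard only: c starts at 1 and only grows)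
def pyLoopC (limit c : Int) (res : List Int) : List Int :=
  if _h : 0 < c ∧ c < limit then pyLoopC limit (c * 5) (res ++ [c]) else res
termination_by (limit - c).toNat
decreasing_by omega

-- middle `while b < limit: <inner loop>; b *= 3`
def pyLoopB (limit b : Int) (res : List Int) : List Int :=
  if _h : 0 < b ∧ b < limit then pyLoopB limit (b * 3) (pyLoopC limit b res) else res
termination_by (limit - b).toNat
decreasing_by omega

-- outer `while a < limit: <middle loop>; a *= 2`
def pyLoopA (limit a : Int) (res : List Int) : List Int :=
  if _h : 0 < a ∧ a < limit then pyLoopA limit (a * 2) (pyLoopB limit a res) else res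
termination_by (limit - a).toNat
decreasing_by omega

-- `results.sort(); return results`
def generate_regular_numbers_py (limit : Int) : List Int :=
  PySem.List.sorted (pyLoopA limit 1 []) (fun x => x) false

-- ===== PORT B =====
-- `powers(p)`: out, v = [], 1; while v < limit: out.append(v); v *= p   (`2 ≤ p ∧ 0 < v` is a totality guard: p is one of 2, 3, 5 and v starts at 1)
def pyPowersAux (limit p v : Int) (out : List Int) : List Int :=
  if h : 2 ≤ p ∧ 0 < v ∧ v < limit then pyPowersAux limit p (v * p) (out ++ [v]) else out
termination_by (limit - v).toNat
decreasing_by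
  have : v < v * p := by nlinarith
  omega

def pyPowers (limit p : Int) : List Int := pyPowersAux limit p 1 []

-- `_merge(xs, ys)`: two-pointer merge of sorted lists (ported as structural recursion on the two lists)
def pyMerge : List Int → List Int → List Int
  | [], ys => ys
  | x :: xs, [] => x :: xs
  | x :: xs, y :: ys => if x < y then x :: pyMerge xs (y :: ys) else y :: pyMerge (x :: xs) ys

def generate_regular_numbers_py_alt (limit : Int) : List Int :=
  let twos := pyPowers limit 2
  (pyPowers limit 3).foldl (fun result t =>
    (pyPowers limit 5).foldl (fun result f =>
      pyMerge result ((twos.filter (fun u => t * f * u < limit)).map (fun u => t * f * u))) result) []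

-- ===== PRECONDITION & SPEC =====
def Spec_generate_regular_numbers_py (limit : Int) (out : List Int) : Prop := out = generate_regular_numbers_py_alt limit
instance (limit : Int) (out : List Int) : Decidable (Spec_generate_regular_numbers_py limit out) := by unfold Spec_generate_regular_numbers_py; infer_instance

-- ===== CLAIM (what is proved, stated in full; the proofs are below) =====
def Claim_equal_generate_regular_numbers_py : Prop := ∀ (limit : Int), Dom_generate_regular_numbers_py limit → Spec_generate_regular_numbers_py limit (generate_regular_numbers_py limit)

-- ===== LEMMAS AND PROOFS =====

-- the target set: 5-smooth numbers below the limit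
def SmoothLT (limit x : Int) : Prop := ∃ i j k : ℕ, x = 2 ^ i * 3 ^ j * 5 ^ k ∧ x < limit

-- exponents of 2, 3, 5 are unique (via Nat.factorization)
lemma pow235_inj {i j k i' j' k' : ℕ}
    (h : (2:ℤ) ^ i * 3 ^ j * 5 ^ k = 2 ^ i' * 3 ^ j' * 5 ^ k') :
    i = i' ∧ j = j' ∧ k = k' := by
  have hn : (2 ^ i * 3 ^ j * 5 ^ k : ℕ) = 2 ^ i' * 3 ^ j' * 5 ^ k' := by
    have : ((2 ^ i * 3 ^ j * 5 ^ k : ℕ) : ℤ) = ((2 ^ i' * 3 ^ j' * 5 ^ k' : ℕ) : ℤ) := by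
      push_cast; exact h
    exact_mod_cast this
  have hf := congrArg Nat.factorization hn
  have p2 : Nat.Prime 2 := by norm_num
  have p3 : Nat.Prime 3 := by norm_num
  have p5 : Nat.Prime 5 := by norm_num
  rw [Nat.factorization_mul (by positivity) (by positivity),
      Nat.factorization_mul (by positivity) (by positivity),
      Nat.factorization_mul (by positivity) (by positivity),
      Nat.factorization_mul (by positivity) (by positivity),
      p2.factorization_pow, p3.factorization_pow, p5.factorization_pow] at hf
  refine ⟨?_, ?_, ?_⟩
  · have := congrFun (congrArg DFunLike.coe hf) 2
    simpa [p2.factorization, p3.factorization, p5.factorization, Finsupp.single_apply] using this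
  · have := congrFun (congrArg DFunLike.coe hf) 3
    simpa [p2.factorization, p3.factorization, p5.factorization, Finsupp.single_apply] using this
  · have := congrFun (congrArg DFunLike.coe hf) 5
    simpa [p2.factorization, p3.factorization, p5.factorization, Finsupp.single_apply] using this

lemma one_le_pow235 (i j k : ℕ) : (1:ℤ) ≤ 2 ^ i * 3 ^ j * 5 ^ k := by
  have h2 : (1:ℤ) ≤ 2 ^ i := one_le_pow₀ (by norm_num)
  have h3 : (1:ℤ) ≤ 3 ^ j := one_le_pow₀ (by norm_num)
  have h5 : (1:ℤ) ≤ 5 ^ k := one_le_pow₀ (by norm_num)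
  calc (1:ℤ) ≤ 2 ^ i := h2
    _ ≤ 2 ^ i * 3 ^ j := le_mul_of_one_le_right (by positivity) h3
    _ ≤ 2 ^ i * 3 ^ j * 5 ^ k := le_mul_of_one_le_right (by positivity) h5

-- each single factor is at most the full product
lemma factors_le_pow235 (i j k : ℕ) :
    (2:ℤ) ^ i ≤ 2 ^ i * 3 ^ j * 5 ^ k ∧ (3:ℤ) ^ j ≤ 2 ^ i * 3 ^ j * 5 ^ k ∧
      (5:ℤ) ^ k ≤ 2 ^ i * 3 ^ j * 5 ^ k := by
  have h2 : (1:ℤ) ≤ 2 ^ i := one_le_pow₀ (by norm_num)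
  have h3 : (1:ℤ) ≤ 3 ^ j := one_le_pow₀ (by norm_num)
  have h5 : (1:ℤ) ≤ 5 ^ k := one_le_pow₀ (by norm_num)
  refine ⟨?_, ?_, ?_⟩
  · calc (2:ℤ) ^ i = 2 ^ i * 1 := by ring
      _ ≤ 2 ^ i * (3 ^ j * 5 ^ k) := by
          apply mul_le_mul_of_nonneg_left _ (by positivity)
          calc (1:ℤ) ≤ 3 ^ j := h3
            _ ≤ 3 ^ j * 5 ^ k := le_mul_of_one_le_right (by positivity) h5
      _ = 2 ^ i * 3 ^ j * 5 ^ k := by ring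
  · calc (3:ℤ) ^ j = 3 ^ j * 1 := by ring
      _ ≤ 3 ^ j * (2 ^ i * 5 ^ k) := by
          apply mul_le_mul_of_nonneg_left _ (by positivity)
          calc (1:ℤ) ≤ 2 ^ i := h2
            _ ≤ 2 ^ i * 5 ^ k := le_mul_of_one_le_right (by positivity) h5
      _ = 2 ^ i * 3 ^ j * 5 ^ k := by ring
  · calc (5:ℤ) ^ k = 5 ^ k * 1 := by ring
      _ ≤ 5 ^ k * (2 ^ i * 3 ^ j) := by
          apply mul_le_mul_of_nonneg_left _ (by positivity)
          calc (1:ℤ) ≤ 2 ^ i := h2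
            _ ≤ 2 ^ i * 3 ^ j := le_mul_of_one_le_right (by positivity) h3
      _ = 2 ^ i * 3 ^ j * 5 ^ k := by ring

-- ---- A-side membership ----
lemma mem_pyLoopC {limit x : Int} : ∀ {c : Int} {res : List Int}, 0 < c →
    (x ∈ pyLoopC limit c res ↔ x ∈ res ∨ ∃ k : ℕ, x = c * 5 ^ k ∧ x < limit) := by
  intro c res
  induction c, res using pyLoopC.induct (limit := limit) with
  | case1 c res h ih =>
    intro hc
    rw [pyLoopC, dif_pos h, ih (by linarith)]
    simp only [List.mem_append, List.mem_singleton, or_assoc]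
    constructor
    · rintro (hx | hx | ⟨k, rfl, hlt⟩)
      · exact Or.inl hx
      · subst hx; exact Or.inr ⟨0, by ring, h.2⟩
      · exact Or.inr ⟨k + 1, by ring, hlt⟩
    · rintro (hx | ⟨k, rfl, hlt⟩)
      · exact Or.inl hx
      · cases k with
        | zero => exact Or.inr (Or.inl (by norm_num))
        | succ k => exact Or.inr (Or.inr ⟨k, by ring, by linarith⟩)
  | case2 c res h =>
    intro hc
    rw [pyLoopC, dif_neg h]
    constructor
    · exact Or.inl
    · rintro (hx | ⟨k, rfl, hlt⟩)
      · exact hx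
      · exfalso
        have h1 : (1:ℤ) ≤ 5 ^ k := one_le_pow₀ (by norm_num)
        have h2 : c ≤ c * 5 ^ k := le_mul_of_one_le_right (le_of_lt hc) h1
        have : limit ≤ c := by
          by_contra hcl
          exact h ⟨hc, by linarith⟩
        linarith

lemma mem_pyLoopB {limit x : Int} : ∀ {b : Int} {res : List Int}, 0 < b →
    (x ∈ pyLoopB limit b res ↔ x ∈ res ∨ ∃ j k : ℕ, x = b * 3 ^ j * 5 ^ k ∧ x < limit) := by
  intro b res
  induction b, res using pyLoopB.induct (limit := limit) with
  | case1 b res h ih =>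
    intro hb
    rw [pyLoopB, dif_pos h, ih (by linarith), mem_pyLoopC hb]
    constructor
    · rintro ((hx | ⟨k, rfl, hlt⟩) | ⟨j, k, rfl, hlt⟩)
      · exact Or.inl hx
      · exact Or.inr ⟨0, k, by ring, hlt⟩
      · exact Or.inr ⟨j + 1, k, by ring, hlt⟩
    · rintro (hx | ⟨j, k, rfl, hlt⟩)
      · exact Or.inl (Or.inl hx)
      · cases j with
        | zero => exact Or.inl (Or.inr ⟨k, by ring, hlt⟩)
        | succ j => exact Or.inr ⟨j, k, by ring, hlt⟩
  | case2 b res h =>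
    intro hb
    rw [pyLoopB, dif_neg h]
    constructor
    · exact Or.inl
    · rintro (hx | ⟨j, k, rfl, hlt⟩)
      · exact hx
      · exfalso
        have h1 : (1:ℤ) ≤ 3 ^ j * 5 ^ k := by
          have h3 : (1:ℤ) ≤ 3 ^ j := one_le_pow₀ (by norm_num)
          have h5 : (1:ℤ) ≤ 5 ^ k := one_le_pow₀ (by norm_num)
          calc (1:ℤ) ≤ 3 ^ j := h3
            _ ≤ 3 ^ j * 5 ^ k := le_mul_of_one_le_right (by positivity) h5
        have h2 : b ≤ b * 3 ^ j * 5 ^ k := by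
          calc b = b * 1 := by ring
            _ ≤ b * (3 ^ j * 5 ^ k) := mul_le_mul_of_nonneg_left h1 (le_of_lt hb)
            _ = b * 3 ^ j * 5 ^ k := by ring
        have : limit ≤ b := by
          by_contra hcl
          exact h ⟨hb, by linarith⟩
        linarith

lemma mem_pyLoopA {limit x : Int} : ∀ {a : Int} {res : List Int}, 0 < a →
    (x ∈ pyLoopA limit a res ↔ x ∈ res ∨ ∃ i j k : ℕ, x = a * 2 ^ i * 3 ^ j * 5 ^ k ∧ x < limit) := by
  intro a res
  induction a, res using pyLoopA.induct (limit := limit) with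
  | case1 a res h ih =>
    intro ha
    rw [pyLoopA, dif_pos h, ih (by linarith), mem_pyLoopB ha]
    constructor
    · rintro ((hx | ⟨j, k, rfl, hlt⟩) | ⟨i, j, k, rfl, hlt⟩)
      · exact Or.inl hx
      · exact Or.inr ⟨0, j, k, by ring, hlt⟩
      · exact Or.inr ⟨i + 1, j, k, by ring, hlt⟩
    · rintro (hx | ⟨i, j, k, rfl, hlt⟩)
      · exact Or.inl (Or.inl hx)
      · cases i with
        | zero => exact Or.inl (Or.inr ⟨j, k, by ring, hlt⟩)
        | succ i => exact Or.inr ⟨i, j, k, by ring, hlt⟩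
  | case2 a res h =>
    intro ha
    rw [pyLoopA, dif_neg h]
    constructor
    · exact Or.inl
    · rintro (hx | ⟨i, j, k, rfl, hlt⟩)
      · exact hx
      · exfalso
        have h1 : (1:ℤ) ≤ 2 ^ i * 3 ^ j * 5 ^ k := one_le_pow235 i j k
        have h2 : a ≤ a * 2 ^ i * 3 ^ j * 5 ^ k := by
          calc a = a * 1 := by ring
            _ ≤ a * (2 ^ i * 3 ^ j * 5 ^ k) := mul_le_mul_of_nonneg_left h1 (le_of_lt ha)
            _ = a * 2 ^ i * 3 ^ j * 5 ^ k := by ring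
        have : limit ≤ a := by
          by_contra hcl
          exact h ⟨ha, by linarith⟩
        linarith

-- ---- A-side nodup ----
lemma nodup_pyLoopC {limit : Int} : ∀ {c : Int} {res : List Int}, 0 < c → res.Nodup →
    (∀ k : ℕ, c * 5 ^ k ∉ res) → (pyLoopC limit c res).Nodup := by
  intro c res
  induction c, res using pyLoopC.induct (limit := limit) with
  | case1 c res h ih =>
    intro hc hres hdisj
    rw [pyLoopC, dif_pos h]
    apply ih (by linarith)
    · simp only [List.nodup_append, List.nodup_cons, List.not_mem_nil, not_false_iff,
        List.nodup_nil, and_true]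
      refine ⟨hres, trivial, ?_⟩
      intro a ha b hb
      simp only [List.mem_singleton] at hb
      subst hb
      intro heq
      subst heq
      have := hdisj 0
      simp only [pow_zero, mul_one] at this
      exact this ha
    · intro k
      have e : c * 5 * 5 ^ k = c * 5 ^ (k + 1) := by ring
      rw [e]
      simp only [List.mem_append, List.mem_singleton]
      push_neg
      refine ⟨hdisj (k + 1), ?_⟩
      intro heq
      have h5 : (1:ℤ) ≤ 5 ^ k := one_le_pow₀ (by norm_num)
      have hpow : (5:ℤ) ^ (k + 1) = 1 := by
        apply mul_left_cancel₀ (ne_of_gt hc)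
        rw [mul_one]
        exact heq
      have : (5:ℤ) ^ (k + 1) = 5 ^ k * 5 := by ring
      nlinarith
  | case2 c res h =>
    intro hc hres hdisj
    rw [pyLoopC, dif_neg h]
    exact hres

lemma nodup_pyLoopB {limit : Int} : ∀ {b : Int} {res : List Int}, 0 < b → res.Nodup →
    (∀ j k : ℕ, b * 3 ^ j * 5 ^ k ∉ res) → (pyLoopB limit b res).Nodup := by
  intro b res
  induction b, res using pyLoopB.induct (limit := limit) with
  | case1 b res h ih =>
    intro hb hres hdisj
    rw [pyLoopB, dif_pos h]
    apply ih (by linarith)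
    · apply nodup_pyLoopC hb hres
      intro k
      have := hdisj 0 k
      simpa using this
    · intro j k
      rw [mem_pyLoopC hb]
      push_neg
      constructor
      · have := hdisj (j + 1) k
        have e : b * 3 * 3 ^ j * 5 ^ k = b * 3 ^ (j + 1) * 5 ^ k := by ring
        rw [e]; exact this
      · intro k' heq
        exfalso
        have hb' : b ≠ 0 := ne_of_gt hb
        have hcan : (3:ℤ) ^ (j + 1) * 5 ^ k = 5 ^ k' := by
          apply mul_left_cancel₀ hb'
          calc b * ((3:ℤ) ^ (j + 1) * 5 ^ k) = b * 3 * 3 ^ j * 5 ^ k := by ring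
            _ = b * 5 ^ k' := heq
        have h2 : (2:ℤ) ^ 0 * 3 ^ (j + 1) * 5 ^ k = 2 ^ 0 * 3 ^ 0 * 5 ^ k' := by
          simpa using hcan
        obtain ⟨-, hj, -⟩ := pow235_inj h2
        omega
  | case2 b res h =>
    intro hb hres hdisj
    rw [pyLoopB, dif_neg h]
    exact hres

lemma nodup_pyLoopA {limit : Int} : ∀ {a : Int} {res : List Int}, 0 < a → res.Nodup →
    (∀ i j k : ℕ, a * 2 ^ i * 3 ^ j * 5 ^ k ∉ res) → (pyLoopA limit a res).Nodup := by
  intro a res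
  induction a, res using pyLoopA.induct (limit := limit) with
  | case1 a res h ih =>
    intro ha hres hdisj
    rw [pyLoopA, dif_pos h]
    apply ih (by linarith)
    · apply nodup_pyLoopB ha hres
      intro j k
      have := hdisj 0 j k
      simpa using this
    · intro i j k
      rw [mem_pyLoopB ha]
      push_neg
      constructor
      · have := hdisj (i + 1) j k
        have e : a * 2 * 2 ^ i * 3 ^ j * 5 ^ k = a * 2 ^ (i + 1) * 3 ^ j * 5 ^ k := by ring
        rw [e]; exact this
      · intro j' k' heq
        exfalso
        have ha' : a ≠ 0 := ne_of_gt ha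
        have hcan : (2:ℤ) ^ (i + 1) * 3 ^ j * 5 ^ k = 3 ^ j' * 5 ^ k' := by
          apply mul_left_cancel₀ ha'
          calc a * ((2:ℤ) ^ (i + 1) * 3 ^ j * 5 ^ k) = a * 2 * 2 ^ i * 3 ^ j * 5 ^ k := by ring
            _ = a * 3 ^ j' * 5 ^ k' := heq
            _ = a * (3 ^ j' * 5 ^ k') := by ring
        have h2 : (2:ℤ) ^ (i + 1) * 3 ^ j * 5 ^ k = 2 ^ 0 * 3 ^ j' * 5 ^ k' := by
          simpa using hcan
        obtain ⟨hi, -, -⟩ := pow235_inj h2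
        omega
  | case2 a res h =>
    intro ha hres hdisj
    rw [pyLoopA, dif_neg h]
    exact hres

-- ---- B-side powers ----
lemma mem_pyPowersAux {limit p x : Int} : ∀ {v : Int} {out : List Int}, 2 ≤ p → 0 < v →
    (x ∈ pyPowersAux limit p v out ↔ x ∈ out ∨ ∃ k : ℕ, x = v * p ^ k ∧ x < limit) := by
  intro v out
  induction v, out using pyPowersAux.induct (limit := limit) (p := p) with
  | case1 v out h ih =>
    intro hp hv
    rw [pyPowersAux, dif_pos h, ih hp (by nlinarith)]
    simp only [List.mem_append, List.mem_singleton, or_assoc]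
    constructor
    · rintro (hx | hx | ⟨k, rfl, hlt⟩)
      · exact Or.inl hx
      · subst hx; exact Or.inr ⟨0, by ring, h.2.2⟩
      · exact Or.inr ⟨k + 1, by ring, hlt⟩
    · rintro (hx | ⟨k, rfl, hlt⟩)
      · exact Or.inl hx
      · cases k with
        | zero => exact Or.inr (Or.inl (by norm_num))
        | succ k => exact Or.inr (Or.inr ⟨k, by ring, by linarith⟩)
  | case2 v out h =>
    intro hp hv
    rw [pyPowersAux, dif_neg h]
    constructor
    · exact Or.inl
    · rintro (hx | ⟨k, rfl, hlt⟩)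
      · exact hx
      · exfalso
        have h1 : (1:ℤ) ≤ p ^ k := one_le_pow₀ (by linarith)
        have h2 : v ≤ v * p ^ k := le_mul_of_one_le_right (le_of_lt hv) h1
        have : limit ≤ v := by
          by_contra hcl
          exact h ⟨hp, hv, by linarith⟩
        linarith

lemma mem_pyPowers {limit p x : Int} (hp : 2 ≤ p) :
    x ∈ pyPowers limit p ↔ ∃ k : ℕ, x = p ^ k ∧ x < limit := by
  rw [pyPowers, mem_pyPowersAux hp one_pos]
  simp

lemma pairwise_pyPowersAux {limit p : Int} : ∀ {v : Int} {out : List Int}, 2 ≤ p → 0 < v →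
    out.Pairwise (· < ·) → (∀ y ∈ out, y < v) → (pyPowersAux limit p v out).Pairwise (· < ·) := by
  intro v out
  induction v, out using pyPowersAux.induct (limit := limit) (p := p) with
  | case1 v out h ih =>
    intro hp hv hout hlt
    rw [pyPowersAux, dif_pos h]
    apply ih hp (by nlinarith)
    · rw [List.pairwise_append]
      refine ⟨hout, by simp, ?_⟩
      intro a ha b hb
      simp only [List.mem_singleton] at hb
      subst hb
      exact hlt a ha
    · intro y hy
      have hvp : v < v * p := by nlinarith
      rcases List.mem_append.1 hy with hy | hy
      · exact lt_trans (hlt y hy) hvp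
      · simp only [List.mem_singleton] at hy
        subst hy; exact hvp
  | case2 v out h =>
    intro hp hv hout hlt
    rw [pyPowersAux, dif_neg h]
    exact hout

lemma pairwise_pyPowers {limit p : Int} (hp : 2 ≤ p) :
    (pyPowers limit p).Pairwise (· < ·) := by
  rw [pyPowers]
  exact pairwise_pyPowersAux hp one_pos (by simp) (by simp)

-- ---- merge ----
lemma mem_pyMerge {xs ys : List Int} {x : Int} :
    x ∈ pyMerge xs ys ↔ x ∈ xs ∨ x ∈ ys := by
  induction xs, ys using pyMerge.induct with
  | case1 ys => simp [pyMerge]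
  | case2 x' xs => simp [pyMerge]
  | case3 x' xs y ys hlt ih =>
    rw [pyMerge, if_pos hlt]
    simp only [List.mem_cons, ih, List.mem_cons]
    tauto
  | case4 x' xs y ys hlt ih =>
    rw [pyMerge, if_neg hlt]
    simp only [List.mem_cons, ih, List.mem_cons]
    tauto

lemma pairwise_pyMerge : ∀ {xs ys : List Int}, xs.Pairwise (· < ·) → ys.Pairwise (· < ·) →
    (∀ x ∈ xs, x ∉ ys) → (pyMerge xs ys).Pairwise (· < ·) := by
  intro xs ys
  induction xs, ys using pyMerge.induct with
  | case1 ys => intro _ hys _; simpa [pyMerge] using hys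
  | case2 x xs => intro hxs _ _; simpa [pyMerge] using hxs
  | case3 x xs y ys hlt ih =>
    intro hxs hys hdisj
    rw [pyMerge, if_pos hlt]
    rw [List.pairwise_cons] at hxs ⊢
    refine ⟨?_, ih hxs.2 hys (fun z hz => hdisj z (List.mem_cons_of_mem x hz))⟩
    intro z hz
    rw [mem_pyMerge] at hz
    rcases hz with hz | hz
    · exact hxs.1 z hz
    · rcases List.mem_cons.1 hz with rfl | hz
      · exact hlt
      · exact lt_trans hlt ((List.pairwise_cons.1 hys).1 z hz)
  | case4 x xs y ys hlt ih =>
    intro hxs hys hdisj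
    rw [pyMerge, if_neg hlt]
    rw [List.pairwise_cons] at hys ⊢
    have hyx : y < x := by
      have hne : x ≠ y := by
        intro heq
        exact hdisj x (List.mem_cons_self) (by simp [heq])
      exact lt_of_le_of_ne (not_lt.1 hlt) (Ne.symm hne)
    refine ⟨?_, ih hxs hys.2 ?_⟩
    · intro z hz
      rw [mem_pyMerge] at hz
      rcases hz with hz | hz
      · rcases List.mem_cons.1 hz with rfl | hz
        · exact hyx
        · exact lt_trans hyx ((List.pairwise_cons.1 hxs).1 z hz)
      · exact hys.1 z hz
    · intro z hz hzys
      exact hdisj z hz (List.mem_cons_of_mem y hzys)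

-- ---- fold of merges over a list of runs ----
lemma foldl_pyMerge_spec (runs : List (List Int)) :
    ∀ acc : List Int, acc.Pairwise (· < ·) → (∀ r ∈ runs, r.Pairwise (· < ·)) →
    (∀ r ∈ runs, ∀ x ∈ acc, x ∉ r) → runs.Pairwise (fun r s => ∀ x ∈ r, x ∉ s) →
    (runs.foldl pyMerge acc).Pairwise (· < ·) ∧
      ∀ x, (x ∈ runs.foldl pyMerge acc ↔ x ∈ acc ∨ ∃ r ∈ runs, x ∈ r) := by
  induction runs with
  | nil => intro acc hacc _ _ _; simpa using hacc
  | cons r rs ih =>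
    intro acc hacc hruns hdisj hpw
    rw [List.foldl_cons]
    have hr : r.Pairwise (· < ·) := hruns r (List.mem_cons_self)
    have hacc' : (pyMerge acc r).Pairwise (· < ·) :=
      pairwise_pyMerge hacc hr (hdisj r (List.mem_cons_self))
    have hpw' := List.pairwise_cons.1 hpw
    have hmain := ih (pyMerge acc r) hacc'
      (fun s hs => hruns s (List.mem_cons_of_mem r hs))
      (by
        intro s hs x hx
        rw [mem_pyMerge] at hx
        rcases hx with hx | hx
        · exact hdisj s (List.mem_cons_of_mem r hs) x hx
        · exact hpw'.1 s hs x hx)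
      hpw'.2
    refine ⟨hmain.1, ?_⟩
    intro x
    rw [(hmain.2 x), mem_pyMerge]
    simp only [List.mem_cons]
    constructor
    · rintro ((hx | hx) | ⟨s, hs, hx⟩)
      · exact Or.inl hx
      · exact Or.inr ⟨r, Or.inl rfl, hx⟩
      · exact Or.inr ⟨s, Or.inr hs, hx⟩
    · rintro (hx | ⟨s, hs | hs, hx⟩)
      · exact Or.inl (Or.inl hx)
      · subst hs; exact Or.inl (Or.inr hx)
      · exact Or.inr ⟨s, hs, hx⟩

-- the run produced for a fixed (t, f), and the list of all runs in fold order
def runTF (limit t f : Int) : List Int :=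
  ((pyPowers limit 2).filter (fun u => t * f * u < limit)).map (fun u => t * f * u)

def runsList (limit : Int) : List (List Int) :=
  (pyPowers limit 3).flatMap (fun t => (pyPowers limit 5).map (fun f => runTF limit t f))

lemma nested_foldl (g : Int → Int → List Int) (ts fs : List Int) (acc : List Int) :
    ts.foldl (fun r t => fs.foldl (fun r f => pyMerge r (g t f)) r) acc
      = (ts.flatMap fun t => fs.map (g t)).foldl pyMerge acc := by
  induction ts generalizing acc with
  | nil => simp
  | cons t ts ih =>
    simp only [List.foldl_cons, List.flatMap_cons, List.foldl_append, List.foldl_map, ih]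

lemma alt_eq_foldl_runs (limit : Int) :
    generate_regular_numbers_py_alt limit = (runsList limit).foldl pyMerge [] := by
  unfold generate_regular_numbers_py_alt runsList
  exact nested_foldl (fun t f => runTF limit t f) _ _ []

lemma mem_runTF {limit t f x : Int} :
    x ∈ runTF limit t f ↔ ∃ u ∈ pyPowers limit 2, t * f * u < limit ∧ x = t * f * u := by
  simp only [runTF, List.mem_map, List.mem_filter, decide_eq_true_eq]
  constructor
  · rintro ⟨u, ⟨hu, hlt⟩, rfl⟩
    exact ⟨u, hu, hlt, rfl⟩
  · rintro ⟨u, hu, hlt, rfl⟩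
    exact ⟨u, ⟨hu, hlt⟩, rfl⟩

lemma pairwise_runTF {limit t f : Int} (ht : 0 < t) (hf : 0 < f) :
    (runTF limit t f).Pairwise (· < ·) := by
  rw [runTF, List.pairwise_map]
  apply List.Pairwise.imp (fun {a b} hab => ?_) ((pairwise_pyPowers (by norm_num)).filter _)
  have htf : 0 < t * f := mul_pos ht hf
  exact mul_lt_mul_of_pos_left hab htf

lemma runTF_disj {limit t f t' f' : Int} {j k j' k' : ℕ}
    (ht : t = (3:ℤ) ^ j) (hf : f = (5:ℤ) ^ k) (ht' : t' = (3:ℤ) ^ j') (hf' : f' = (5:ℤ) ^ k')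
    (hne : t ≠ t' ∨ f ≠ f') : ∀ x ∈ runTF limit t f, x ∉ runTF limit t' f' := by
  intro x hx hx'
  rw [mem_runTF] at hx hx'
  obtain ⟨u, hu, _, rfl⟩ := hx
  obtain ⟨u', hu', _, heq⟩ := hx'
  rw [mem_pyPowers (by norm_num)] at hu hu'
  obtain ⟨i, rfl, -⟩ := hu
  obtain ⟨i', rfl, -⟩ := hu'
  subst ht hf ht' hf'
  have h2 : (2:ℤ) ^ i * 3 ^ j * 5 ^ k = 2 ^ i' * 3 ^ j' * 5 ^ k' := by linear_combination heq
  obtain ⟨hi, hj, hk⟩ := pow235_inj h2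
  subst hj hk
  rcases hne with hne | hne <;> exact hne rfl

lemma pairwise_runsList_aux (limit : Int) (fs : List Int)
    (hfsp : ∀ f ∈ fs, ∃ k : ℕ, f = (5:ℤ) ^ k) (hnfs : fs.Nodup) :
    ∀ (ts : List Int), (∀ t ∈ ts, ∃ j : ℕ, t = (3:ℤ) ^ j) → ts.Nodup →
    (ts.flatMap fun t => fs.map fun f => runTF limit t f).Pairwise (fun r s => ∀ x ∈ r, x ∉ s) := by
  intro ts
  induction ts with
  | nil => simp
  | cons t ts ih =>
    intro htsp hnts
    rw [List.flatMap_cons, List.pairwise_append]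
    obtain ⟨htts, hnts'⟩ := List.nodup_cons.1 hnts
    obtain ⟨j, hj⟩ := htsp t List.mem_cons_self
    refine ⟨?_, ih (fun t' ht' => htsp t' (List.mem_cons_of_mem t ht')) hnts', ?_⟩
    · rw [List.pairwise_map]
      apply List.Pairwise.imp_of_mem ?_ hnfs
      intro f f' hf hf' hne
      obtain ⟨k, hk⟩ := hfsp f hf
      obtain ⟨k', hk'⟩ := hfsp f' hf'
      exact runTF_disj hj hk hj hk' (Or.inr hne)
    · intro r hr s hs
      simp only [List.mem_map] at hr
      simp only [List.mem_flatMap, List.mem_map] at hs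
      obtain ⟨f, hf, rfl⟩ := hr
      obtain ⟨t', ht', f', hf', rfl⟩ := hs
      obtain ⟨j', hj'⟩ := htsp t' (List.mem_cons_of_mem t ht')
      obtain ⟨k, hk⟩ := hfsp f hf
      obtain ⟨k', hk'⟩ := hfsp f' hf'
      have htne : t ≠ t' := fun heq => htts (heq ▸ ht')
      exact runTF_disj hj hk hj' hk' (Or.inl htne)

lemma pairwise_runsList (limit : Int) :
    (runsList limit).Pairwise (fun r s => ∀ x ∈ r, x ∉ s) := by
  rw [runsList]
  apply pairwise_runsList_aux
  · intro f hf
    obtain ⟨k, hk, -⟩ := (mem_pyPowers (by norm_num)).1 hf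
    exact ⟨k, hk⟩
  · exact (pairwise_pyPowers (by norm_num)).imp ne_of_lt
  · intro t ht
    obtain ⟨j, hj, -⟩ := (mem_pyPowers (by norm_num)).1 ht
    exact ⟨j, hj⟩
  · exact (pairwise_pyPowers (by norm_num)).imp ne_of_lt

lemma alt_spec (limit : Int) :
    (generate_regular_numbers_py_alt limit).Pairwise (· < ·) ∧
      ∀ x, (x ∈ generate_regular_numbers_py_alt limit ↔ ∃ r ∈ runsList limit, x ∈ r) := by
  rw [alt_eq_foldl_runs]
  have hruns : ∀ r ∈ runsList limit, r.Pairwise (· < ·) := by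
    intro r hr
    simp only [runsList, List.mem_flatMap, List.mem_map] at hr
    obtain ⟨t, ht, f, hf, rfl⟩ := hr
    obtain ⟨j, rfl, -⟩ := (mem_pyPowers (by norm_num)).1 ht
    obtain ⟨k, rfl, -⟩ := (mem_pyPowers (by norm_num)).1 hf
    exact pairwise_runTF (pow_pos (by norm_num) j) (pow_pos (by norm_num) k)
  have h := foldl_pyMerge_spec (runsList limit) [] (by simp) hruns (by simp)
    (pairwise_runsList limit)
  refine ⟨h.1, fun x => ?_⟩
  rw [h.2 x]
  simp

lemma mem_alt_iff {limit x : Int} :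
    x ∈ generate_regular_numbers_py_alt limit ↔ SmoothLT limit x := by
  rw [(alt_spec limit).2 x]
  constructor
  · rintro ⟨r, hr, hx⟩
    simp only [runsList, List.mem_flatMap, List.mem_map] at hr
    obtain ⟨t, ht, f, hf, rfl⟩ := hr
    obtain ⟨j, rfl, -⟩ := (mem_pyPowers (by norm_num)).1 ht
    obtain ⟨k, rfl, -⟩ := (mem_pyPowers (by norm_num)).1 hf
    rw [mem_runTF] at hx
    obtain ⟨u, hu, hlt, rfl⟩ := hx
    obtain ⟨i, rfl, -⟩ := (mem_pyPowers (by norm_num)).1 hu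
    exact ⟨i, j, k, by ring, hlt⟩
  · rintro ⟨i, j, k, rfl, hlt⟩
    obtain ⟨h2le, h3le, h5le⟩ := factors_le_pow235 i j k
    refine ⟨runTF limit (3 ^ j) (5 ^ k), ?_, ?_⟩
    · simp only [runsList, List.mem_flatMap, List.mem_map]
      refine ⟨3 ^ j, ?_, 5 ^ k, ?_, rfl⟩
      · rw [mem_pyPowers (by norm_num)]
        exact ⟨j, rfl, by linarith⟩
      · rw [mem_pyPowers (by norm_num)]
        exact ⟨k, rfl, by linarith⟩
    · rw [mem_runTF]
      refine ⟨2 ^ i, ?_, ?_, by ring⟩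
      · rw [mem_pyPowers (by norm_num)]
        exact ⟨i, rfl, by linarith⟩
      · have e : (3:ℤ) ^ j * 5 ^ k * 2 ^ i = 2 ^ i * 3 ^ j * 5 ^ k := by ring
        rw [e]; exact hlt

lemma pairwise_alt (limit : Int) :
    (generate_regular_numbers_py_alt limit).Pairwise (· < ·) :=
  (alt_spec limit).1

lemma mem_A_iff {limit x : Int} :
    x ∈ pyLoopA limit 1 [] ↔ SmoothLT limit x := by
  rw [mem_pyLoopA one_pos]
  simp only [List.not_mem_nil, false_or, one_mul, SmoothLT]

lemma nodup_A (limit : Int) : (pyLoopA limit 1 []).Nodup := by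
  exact nodup_pyLoopA one_pos List.nodup_nil (by simp)

-- ===== VERDICT (by name: the statement is the Claim_ definition above) =====
theorem generate_regular_numbers_py_spec : Claim_equal_generate_regular_numbers_py := by
  intro limit _
  show _ = _
  unfold generate_regular_numbers_py
  apply PySem.List.sorted_eq_of_perm_of_pairwise_lt
  · apply List.perm_of_nodup_nodup_toFinset_eq
    · exact (pairwise_alt limit).imp ne_of_lt
    · exact nodup_A limit
    · ext x
      simp only [List.mem_toFinset]
      rw [mem_alt_iff, mem_A_iff]
  · exact (pairwise_alt limit).imp (fun h => h)
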